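-- pv_equiv track=rewrite | github.com/D7ry/cs170-hw | hw2/Q3.py | solution
-- ===== SOURCE A (Python) =====
-- class ProblemState:
--     def __init__(self):
--         self.even_r0:int = 0
--         self.even_r1:int = 0
--         self.even_r2:int = 0
--
--         self.odd_r0:int = 0
--         self.odd_r1:int = 0
--         self.odd_r2:int = 0
--
-- def solution(array:'list[int]') -> int:
--     state:ProblemState = ProblemState()
--     while len(array) != 0:
--         elem = array.pop() # get one element from array
--         remainder = elem % 3
--         # size of all sets *= 2 + 1(from the number alone)
--         new_odd_r0:int = 0
--         new_even_r0:int = 0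
--         new_odd_r1:int =0
--         new_even_r1:int =0
--         new_odd_r2:int = 0
--         new_even_r2:int = 0
--         if remainder == 0:
--             new_odd_r0 = state.odd_r0 + state.even_r0 + 1
--             new_even_r0 = state.even_r0 + state.odd_r0
--             new_odd_r1 = state.odd_r1 + state.even_r1
--             new_even_r1 = state.even_r1 + state.odd_r1
--             new_odd_r2 = state.odd_r2 + state.even_r2
--             new_even_r2 = state.even_r2 + state.odd_r2
--         elif remainder == 1:
--             new_odd_r0 = state.odd_r0 + state.even_r2
--             new_even_r0 = state.even_r0 + state.odd_r2
--             new_odd_r1 = state.odd_r1 + state.even_r0 + 1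
--             new_even_r1 = state.even_r1 + state.odd_r0
--             new_odd_r2 = state.odd_r2 + state.even_r1
--             new_even_r2 = state.even_r2 + state.odd_r1
--         elif remainder == 2:
--             new_odd_r0 = state.odd_r0 + state.even_r1
--             new_even_r0 = state.even_r0 + state.odd_r1
--             new_odd_r1 = state.odd_r1 + state.even_r2
--             new_even_r1 = state.even_r1 + state.odd_r2
--             new_odd_r2 = state.odd_r2 + state.even_r0 + 1
--             new_even_r2 = state.even_r2 + state.odd_r0
--         state.odd_r0 = new_odd_r0
--         state.even_r0 = new_even_r0
--         state.odd_r1 = new_odd_r1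
--         state.even_r1 = new_even_r1
--         state.odd_r2 = new_odd_r2
--         state.even_r2 = new_even_r2
--
--     return state.odd_r0
-- ===== SOURCE B (Python) =====
-- # Re-implementation by counting + fast exponentiation: the multiset of subset
-- # (size parity, sum mod 3) profiles is the group-algebra element
-- # prod_r (1 + g_r)^{c_r} over Z[Z2 x Z3], where c_r counts elements with
-- # x % 3 == r and g_r is the group element (1, r).  B counts the three residue
-- # classes in one pass and computes each factor by binary exponentiation
-- # (O(log n) 6-term convolutions instead of A's n counter updates).
-- # Note: A empties its argument list via pop(); B does not mutate it
-- # (the equivalence is about the return value).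
--
-- # an element of Z[Z2 x Z3] is a list of 6 coefficients, index p * 3 + s
--
-- def gmul(f, g):
--     h = [0] * 6
--     for i in range(6):
--         for j in range(6):
--             h[((i // 3 + j // 3) % 2) * 3 + (i % 3 + j % 3) % 3] += f[i] * g[j]
--     return h
--
-- def gpow(f, n):
--     r = [1, 0, 0, 0, 0, 0]          # the unit: 1 * identity element
--     while n > 0:
--         if n % 2 == 1:
--             r = gmul(r, f)
--         f = gmul(f, f)
--         n //= 2
--     return r
--
-- G0 = [1, 0, 0, 1, 0, 0]             # 1 + g_(1,0)
-- G1 = [1, 0, 0, 0, 1, 0]             # 1 + g_(1,1)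
-- G2 = [1, 0, 0, 0, 0, 1]             # 1 + g_(1,2)
--
-- def solution(array: 'list[int]') -> int:
--     c0 = c1 = c2 = 0
--     for x in array:
--         r = x % 3
--         if r == 0:
--             c0 += 1
--         elif r == 1:
--             c1 += 1
--         else:
--             c2 += 1
--     f = gmul(gpow(G0, c0), gmul(gpow(G1, c1), gpow(G2, c2)))
--     return f[3]                     # coefficient of (odd size, sum 0 mod 3)
-- ===== Notes on version B (the rewrite author's own statement) =====
-- stated objective: faster
-- what changed: Instead of an O(n) pop-loop updating six DP counters per element, B counts the three residue classes mod 3 in one pass and computes prod_r (1+g_r)^{c_r} in the group algebra Z[Z2 x Z3] by binary exponentiation, reading off the (odd, 0 mod 3) coefficient.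
import Mathlib
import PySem

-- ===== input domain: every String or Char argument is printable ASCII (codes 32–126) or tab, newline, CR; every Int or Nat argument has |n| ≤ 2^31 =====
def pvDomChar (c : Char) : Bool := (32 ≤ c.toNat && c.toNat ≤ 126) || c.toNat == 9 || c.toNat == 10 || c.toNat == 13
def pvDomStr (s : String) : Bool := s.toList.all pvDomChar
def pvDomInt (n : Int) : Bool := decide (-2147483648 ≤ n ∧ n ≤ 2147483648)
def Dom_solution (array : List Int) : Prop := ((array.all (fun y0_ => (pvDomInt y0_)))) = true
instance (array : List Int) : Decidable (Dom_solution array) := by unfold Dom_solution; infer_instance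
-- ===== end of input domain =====

-- B replaces A's element-by-element six-counter DP by residue counting plus binary
-- exponentiation in the group algebra Z[Z2 × Z3] (measured faster on large inputs).
-- A empties its argument list via pop(); the equivalence proved is about the return value.

-- ===== PORT A =====
-- A's while loop: pop from the end of the array, update the six counters by the
-- popped element's remainder mod 3; at the end return odd_r0.
def solLoop (arr : List Int) (e0 o0 e1 o1 e2 o2 : Int) : Int :=
  if h : arr = [] then o0
  else
    let elem := arr.getLast h
    let r := PySem.Int.mod elem 3
    if r = 0 then
      solLoop arr.dropLast (e0 + o0) (o0 + e0 + 1) (e1 + o1) (o1 + e1) (e2 + o2) (o2 + e2)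
    else if r = 1 then
      solLoop arr.dropLast (e0 + o2) (o0 + e2) (e1 + o0) (o1 + e0 + 1) (e2 + o1) (o2 + e1)
    else if r = 2 then
      solLoop arr.dropLast (e0 + o1) (o0 + e1) (e1 + o2) (o1 + e2) (e2 + o0) (o2 + e0 + 1)
    else
      solLoop arr.dropLast 0 0 0 0 0 0
  termination_by arr.length
  decreasing_by all_goals (simp [List.length_dropLast]; exact List.length_pos_iff.mpr h)

def solution (array : List Int) : Int := solLoop array 0 0 0 0 0 0

-- ===== PORT B =====
-- an element of Z[Z2 × Z3] is a vector of 6 coefficients, index p * 3 + s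
def pvIdx (i j : Fin 6) : Fin 6 :=
  ⟨(i.val / 3 + j.val / 3) % 2 * 3 + (i.val % 3 + j.val % 3) % 3, by omega⟩

-- Source B's gmul double loop, as the resulting coefficient sums
def pvGmul (f g : Fin 6 → Int) : Fin 6 → Int :=
  fun k => ∑ i, ∑ j, if pvIdx i j = k then f i * g j else 0

def pvOne : Fin 6 → Int := ![1, 0, 0, 0, 0, 0]

-- Source B's gpow while loop (binary exponentiation)
def pvPowLoop (r f : Fin 6 → Int) (n : Int) : Fin 6 → Int :=
  if _h : 0 < n then
    pvPowLoop (if PySem.Int.mod n 2 = 1 then pvGmul r f else r)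
      (pvGmul f f) (PySem.Int.floordiv n 2)
  else r
  termination_by n.toNat
  decreasing_by
    rw [PySem.Int.floordiv_eq_ediv_of_pos (by omega)]
    omega

def pvGpow (f : Fin 6 → Int) (n : Int) : Fin 6 → Int := pvPowLoop pvOne f n

def pvG0 : Fin 6 → Int := ![1, 0, 0, 1, 0, 0]
def pvG1 : Fin 6 → Int := ![1, 0, 0, 0, 1, 0]
def pvG2 : Fin 6 → Int := ![1, 0, 0, 0, 0, 1]

-- Source B's counting for-loop
def pvCount (array : List Int) : Int × Int × Int :=
  array.foldl
    (fun c x =>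
      let r := PySem.Int.mod x 3
      if r = 0 then (c.1 + 1, c.2.1, c.2.2)
      else if r = 1 then (c.1, c.2.1 + 1, c.2.2)
      else (c.1, c.2.1, c.2.2 + 1))
    (0, 0, 0)

def solution_alt (array : List Int) : Int :=
  let c := pvCount array
  let f := pvGmul (pvGpow pvG0 c.1) (pvGmul (pvGpow pvG1 c.2.1) (pvGpow pvG2 c.2.2))
  f 3

-- ===== PRECONDITION & SPEC =====
def Spec_solution (array : List Int) (out : Int) : Prop := out = solution_alt array
instance (array : List Int) (out : Int) : Decidable (Spec_solution array out) := by unfold Spec_solution; infer_instance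

-- ===== CLAIM (what is proved, stated in full; the proofs are below) =====
def Claim_equal_solution : Prop := ∀ (array : List Int), Dom_solution array → Spec_solution array (solution array)

-- ===== LEMMAS AND PROOFS =====

-- every Python remainder mod 3 is 0, 1 or 2
theorem pvMod3 (x : Int) : PySem.Int.mod x 3 = 0 ∨ PySem.Int.mod x 3 = 1 ∨ PySem.Int.mod x 3 = 2 := by
  rw [PySem.Int.mod_eq_emod_of_pos (by omega)]
  omega

-- the 36-term double sum written out once; all later computation goes through this
theorem pvGmul_explicit (f g : Fin 6 → Int) :
    pvGmul f g =
      ![f 0 * g 0 + f 1 * g 2 + f 2 * g 1 + f 3 * g 3 + f 4 * g 5 + f 5 * g 4,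
        f 0 * g 1 + f 1 * g 0 + f 2 * g 2 + f 3 * g 4 + f 4 * g 3 + f 5 * g 5,
        f 0 * g 2 + f 1 * g 1 + f 2 * g 0 + f 3 * g 5 + f 4 * g 4 + f 5 * g 3,
        f 0 * g 3 + f 1 * g 5 + f 2 * g 4 + f 3 * g 0 + f 4 * g 2 + f 5 * g 1,
        f 0 * g 4 + f 1 * g 3 + f 2 * g 5 + f 3 * g 1 + f 4 * g 0 + f 5 * g 2,
        f 0 * g 5 + f 1 * g 4 + f 2 * g 3 + f 3 * g 2 + f 4 * g 1 + f 5 * g 0] := by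
  funext k
  fin_cases k <;> simp [pvGmul, pvIdx, Fin.sum_univ_six, Fin.ext_iff]

theorem pvGmul_one_left (f : Fin 6 → Int) : pvGmul pvOne f = f := by
  funext k
  fin_cases k <;> simp [pvGmul_explicit, pvOne]

theorem pvGmul_one_right (f : Fin 6 → Int) : pvGmul f pvOne = f := by
  funext k
  fin_cases k <;> simp [pvGmul_explicit, pvOne]

theorem pvIdx_comm : ∀ i j : Fin 6, pvIdx i j = pvIdx j i := by decide

theorem pvIdx_assoc : ∀ i j c : Fin 6, pvIdx (pvIdx i j) c = pvIdx i (pvIdx j c) := by decide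

theorem pvSwap3 (X : Fin 6 → Fin 6 → Fin 6 → Int) :
    (∑ a, ∑ i, ∑ j, X a i j) = ∑ i, ∑ j, ∑ a, X a i j := by
  rw [Finset.sum_comm]
  exact Finset.sum_congr rfl fun i _ => Finset.sum_comm

theorem pvGmul_comm (f g : Fin 6 → Int) : pvGmul f g = pvGmul g f := by
  funext k
  unfold pvGmul
  rw [Finset.sum_comm]
  refine Finset.sum_congr rfl fun j _ => Finset.sum_congr rfl fun i _ => ?_
  rw [pvIdx_comm j i, mul_comm]

theorem pvGmul_triple (f g h : Fin 6 → Int) (k : Fin 6) :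
    pvGmul (pvGmul f g) h k =
      ∑ i, ∑ j, ∑ c, if pvIdx (pvIdx i j) c = k then f i * g j * h c else 0 := by
  show (∑ a, ∑ c, if pvIdx a c = k then (pvGmul f g a) * h c else 0) = _
  rw [Finset.sum_comm]
  have step : ∀ c, (∑ a, if pvIdx a c = k then (pvGmul f g a) * h c else 0)
      = ∑ i, ∑ j, if pvIdx (pvIdx i j) c = k then f i * g j * h c else 0 := by
    intro c
    have hpt : ∀ a, (if pvIdx a c = k then (pvGmul f g a) * h c else 0)
        = ∑ i, ∑ j, if pvIdx i j = a then (if pvIdx a c = k then f i * g j * h c else 0) else 0 := by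
      intro a
      simp only [pvGmul, Finset.sum_mul, ite_mul, zero_mul]
      split_ifs with hP
      · refine Finset.sum_congr rfl fun i _ => Finset.sum_congr rfl fun j _ => ?_
        split_ifs <;> simp [mul_assoc]
      · simp
    rw [Finset.sum_congr rfl fun a _ => hpt a, pvSwap3]
    refine Finset.sum_congr rfl fun i _ => Finset.sum_congr rfl fun j _ => ?_
    rw [Finset.sum_ite_eq]
    simp
  rw [Finset.sum_congr rfl fun c _ => step c, Finset.sum_comm]
  exact Finset.sum_congr rfl fun i _ => Finset.sum_comm

theorem pvGmul_triple' (f g h : Fin 6 → Int) (k : Fin 6) :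
    pvGmul f (pvGmul g h) k =
      ∑ i, ∑ j, ∑ c, if pvIdx i (pvIdx j c) = k then f i * (g j * h c) else 0 := by
  show (∑ i, ∑ a, if pvIdx i a = k then f i * (pvGmul g h a) else 0) = _
  refine Finset.sum_congr rfl fun i _ => ?_
  have hpt : ∀ a, (if pvIdx i a = k then f i * (pvGmul g h a) else 0)
      = ∑ j, ∑ c, if pvIdx j c = a then (if pvIdx i a = k then f i * (g j * h c) else 0) else 0 := by
    intro a
    simp only [pvGmul, Finset.mul_sum, mul_ite, mul_zero]
    split_ifs with hP
    · exact Finset.sum_congr rfl fun j _ => Finset.sum_congr rfl fun c _ => by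
        split_ifs <;> simp
    · simp
  rw [Finset.sum_congr rfl fun a _ => hpt a, pvSwap3]
  refine Finset.sum_congr rfl fun j _ => Finset.sum_congr rfl fun c _ => ?_
  rw [Finset.sum_ite_eq]
  simp

theorem pvGmul_assoc (f g h : Fin 6 → Int) :
    pvGmul (pvGmul f g) h = pvGmul f (pvGmul g h) := by
  funext k
  rw [pvGmul_triple, pvGmul_triple']
  refine Finset.sum_congr rfl fun i _ => Finset.sum_congr rfl fun j _ =>
    Finset.sum_congr rfl fun c _ => ?_
  rw [pvIdx_assoc, mul_assoc]

-- plain iterated product (proof-side)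
def pvMpow (f : Fin 6 → Int) : Nat → Fin 6 → Int
  | 0 => pvOne
  | n + 1 => pvGmul (pvMpow f n) f

theorem pvMpow_sq (f : Fin 6 → Int) (k : Nat) :
    pvMpow (pvGmul f f) k = pvMpow f (2 * k) := by
  induction k with
  | zero => rfl
  | succ k ih =>
    have h2 : 2 * (k + 1) = 2 * k + 1 + 1 := by omega
    rw [pvMpow, ih, h2, pvMpow, pvMpow, pvGmul_assoc]

theorem pvPowLoop_eq (k : Nat) : ∀ (r f : Fin 6 → Int) (n : Int),
    0 ≤ n → n.toNat = k → pvPowLoop r f n = pvGmul r (pvMpow f k) := by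
  induction k using Nat.strong_induction_on with
  | _ k ih =>
    intro r f n hn hk
    rw [pvPowLoop]
    by_cases h : 0 < n
    · rw [dif_pos h]
      have hmod : PySem.Int.mod n 2 = n % 2 := PySem.Int.mod_eq_emod_of_pos (by omega)
      have hdiv : PySem.Int.floordiv n 2 = n / 2 := PySem.Int.floordiv_eq_ediv_of_pos (by omega)
      have hlt : (n / 2).toNat < k := by omega
      have hrec : ∀ r' : Fin 6 → Int, pvPowLoop r' (pvGmul f f) (n / 2) =
          pvGmul r' (pvMpow (pvGmul f f) (n / 2).toNat) :=
        fun r' => ih _ hlt r' (pvGmul f f) (n / 2) (by omega) rfl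
      rw [hmod, hdiv]
      by_cases hb : n % 2 = 1
      · have hk2 : k = 2 * (n / 2).toNat + 1 := by omega
        rw [if_pos hb, hrec, pvMpow_sq, hk2, pvMpow, pvGmul_comm (pvMpow f _) f,
          ← pvGmul_assoc]
      · have hk2 : k = 2 * (n / 2).toNat := by omega
        rw [if_neg hb, hrec, pvMpow_sq, hk2]
    · rw [dif_neg h]
      have hz : k = 0 := by omega
      rw [hz, pvMpow, pvGmul_one_right]

theorem pvGmul_mpow (f : Fin 6 → Int) (k : Nat) (v : Fin 6 → Int) :
    pvGmul (pvMpow f k) v = (pvGmul f)^[k] v := by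
  induction k generalizing v with
  | zero => rw [pvMpow, pvGmul_one_left, Function.iterate_zero, id]
  | succ k ih =>
    rw [pvMpow, pvGmul_comm (pvMpow f k) f, pvGmul_assoc, ih,
      Function.iterate_succ_apply']

theorem pvGpow_apply (f : Fin 6 → Int) (n : Int) (v : Fin 6 → Int) (hn : 0 ≤ n) :
    pvGmul (pvGpow f n) v = (pvGmul f)^[n.toNat] v := by
  rw [pvGpow, pvPowLoop_eq n.toNat _ _ _ hn rfl, pvGmul_one_left, pvGmul_mpow]

theorem pvGpow_eq (f : Fin 6 → Int) (n : Int) (hn : 0 ≤ n) :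
    pvGpow f n = (pvGmul f)^[n.toNat] pvOne := by
  rw [← pvGpow_apply f n pvOne hn, pvGmul_one_right]

-- multiplying the shifted (empty-subset-included) coefficient vector by 1 + g_(1,r)
theorem pvStepv0 (e0 o0 e1 o1 e2 o2 : Int) :
    pvGmul pvG0 ![e0 + 1, e1, e2, o0, o1, o2] =
      ![(e0 + o0) + 1, e1 + o1, e2 + o2, o0 + e0 + 1, o1 + e1, o2 + e2] := by
  funext k
  fin_cases k <;> simp [pvGmul_explicit, pvG0] <;> ring

theorem pvStepv1 (e0 o0 e1 o1 e2 o2 : Int) :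
    pvGmul pvG1 ![e0 + 1, e1, e2, o0, o1, o2] =
      ![(e0 + o2) + 1, e1 + o0, e2 + o1, o0 + e2, o1 + e0 + 1, o2 + e1] := by
  funext k
  fin_cases k <;> simp [pvGmul_explicit, pvG1] <;> ring

theorem pvStepv2 (e0 o0 e1 o1 e2 o2 : Int) :
    pvGmul pvG2 ![e0 + 1, e1, e2, o0, o1, o2] =
      ![(e0 + o1) + 1, e1 + o2, e2 + o0, o0 + e1, o1 + e2, o2 + e0 + 1] := by
  funext k
  fin_cases k <;> simp [pvGmul_explicit, pvG2] <;> ring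

-- A's per-element transition as multiplication by 1 + g_(1, x mod 3)
def pvStep (x : Int) (v : Fin 6 → Int) : Fin 6 → Int :=
  let r := PySem.Int.mod x 3
  if r = 0 then pvGmul pvG0 v else if r = 1 then pvGmul pvG1 v else pvGmul pvG2 v

def pvG (l : List Int) (v : Fin 6 → Int) : Fin 6 → Int := l.foldr pvStep v

theorem solLoop_eq_G : ∀ (arr : List Int) (e0 o0 e1 o1 e2 o2 : Int),
    solLoop arr e0 o0 e1 o1 e2 o2 = pvG arr ![e0 + 1, e1, e2, o0, o1, o2] 3 := by
  intro arr
  induction arr using List.reverseRecOn with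
  | nil => intro e0 o0 e1 o1 e2 o2; rw [solLoop]; simp [pvG]
  | append_singleton l x ih =>
    intro e0 o0 e1 o1 e2 o2
    rw [solLoop]
    have hne : l ++ [x] ≠ [] := by simp
    have hG : pvG (l ++ [x]) ![e0 + 1, e1, e2, o0, o1, o2] =
        pvG l (pvStep x ![e0 + 1, e1, e2, o0, o1, o2]) := by
      simp [pvG, List.foldr_append]
    simp only [hne, dif_neg, not_false_iff, List.getLast_concat, List.dropLast_concat]
    rcases pvMod3 x with h | h | h <;>
      simp only [h, if_true, if_false, hG, pvStep, one_ne_zero, OfNat.ofNat_ne_zero,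
        OfNat.ofNat_ne_one, ih, pvStepv0, pvStepv1, pvStepv2]

-- the residue counts Source B's first loop computes
def pvCnt (r : Int) (l : List Int) : Nat := l.countP (fun x => decide (PySem.Int.mod x 3 = r))

theorem pvCount_eq_aux : ∀ (l : List Int) (a b c : Int),
    l.foldl (fun c x =>
      let r := PySem.Int.mod x 3
      if r = 0 then (c.1 + 1, c.2.1, c.2.2)
      else if r = 1 then (c.1, c.2.1 + 1, c.2.2)
      else (c.1, c.2.1, c.2.2 + 1)) (a, b, c) =
      (a + (pvCnt 0 l : Int), b + (pvCnt 1 l : Int), c + (pvCnt 2 l : Int)) := by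
  intro l
  induction l with
  | nil => intro a b c; simp [pvCnt]
  | cons x l ih =>
    intro a b c
    have hm := PySem.Int.mod_eq_emod_of_pos (a := x) (b := 3) (by omega)
    rcases pvMod3 x with h | h | h <;>
      simp only [List.foldl_cons, h, one_ne_zero, OfNat.ofNat_ne_zero,
        OfNat.ofNat_ne_one, reduceIte, ih, pvCnt, List.countP_cons] <;>
      (simp; omega)

theorem pvCount_eq (l : List Int) :
    pvCount l = ((pvCnt 0 l : Int), (pvCnt 1 l : Int), (pvCnt 2 l : Int)) := by
  have := pvCount_eq_aux l 0 0 0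
  simpa [pvCount] using this

-- multiplications by the three class elements commute
theorem pvCommFn (g g' : Fin 6 → Int) : Function.Commute (pvGmul g) (pvGmul g') := by
  intro v
  rw [← pvGmul_assoc, pvGmul_comm g g', pvGmul_assoc]

-- the fold over the list equals per-class iteration (order does not matter)
theorem pvG_eq (l : List Int) (v : Fin 6 → Int) :
    pvG l v = (pvGmul pvG0)^[pvCnt 0 l] ((pvGmul pvG1)^[pvCnt 1 l]
      ((pvGmul pvG2)^[pvCnt 2 l] v)) := by
  induction l with
  | nil => simp [pvG, pvCnt]
  | cons x l ih =>
    have hG : pvG (x :: l) v = pvStep x (pvG l v) := rfl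
    have hm := PySem.Int.mod_eq_emod_of_pos (a := x) (b := 3) (by omega)
    rcases pvMod3 x with h | h | h
    · have c0 : pvCnt 0 (x :: l) = pvCnt 0 l + 1 := by (simp [pvCnt, List.countP_cons]; omega)
      have c1 : pvCnt 1 (x :: l) = pvCnt 1 l := by (simp [pvCnt, List.countP_cons]; omega)
      have c2 : pvCnt 2 (x :: l) = pvCnt 2 l := by (simp [pvCnt, List.countP_cons]; omega)
      rw [hG, ih, c0, c1, c2]
      simp only [pvStep, h, if_true]
      rw [← Function.iterate_succ_apply' (pvGmul pvG0)]
    · have c0 : pvCnt 0 (x :: l) = pvCnt 0 l := by (simp [pvCnt, List.countP_cons]; omega)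
      have c1 : pvCnt 1 (x :: l) = pvCnt 1 l + 1 := by (simp [pvCnt, List.countP_cons]; omega)
      have c2 : pvCnt 2 (x :: l) = pvCnt 2 l := by (simp [pvCnt, List.countP_cons]; omega)
      rw [hG, ih, c0, c1, c2]
      simp only [pvStep, h, one_ne_zero, reduceIte]
      rw [((pvCommFn pvG1 pvG0).iterate_right _).eq,
        ← Function.iterate_succ_apply' (pvGmul pvG1)]
    · have c0 : pvCnt 0 (x :: l) = pvCnt 0 l := by (simp [pvCnt, List.countP_cons]; omega)
      have c1 : pvCnt 1 (x :: l) = pvCnt 1 l := by (simp [pvCnt, List.countP_cons]; omega)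
      have c2 : pvCnt 2 (x :: l) = pvCnt 2 l + 1 := by (simp [pvCnt, List.countP_cons]; omega)
      rw [hG, ih, c0, c1, c2]
      simp only [pvStep, h, OfNat.ofNat_ne_zero, OfNat.ofNat_ne_one, reduceIte]
      rw [((pvCommFn pvG2 pvG0).iterate_right _).eq,
        ((pvCommFn pvG2 pvG1).iterate_right _).eq,
        ← Function.iterate_succ_apply' (pvGmul pvG2)]

-- ===== VERDICT (by name: the statement is the Claim_ definition above) =====
theorem solution_spec : Claim_equal_solution := by
  unfold Claim_equal_solution
  intro array _
  unfold Spec_solution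
  have hA : solution array = pvG array pvOne 3 := by
    have h0 : (![(0:Int) + 1, 0, 0, 0, 0, 0] : Fin 6 → Int) = pvOne := by
      funext k; fin_cases k <;> simp [pvOne]
    have := solLoop_eq_G array 0 0 0 0 0 0
    rw [h0] at this
    simpa [solution] using this
  have hB : solution_alt array =
      ((pvGmul pvG0)^[pvCnt 0 array] ((pvGmul pvG1)^[pvCnt 1 array]
        ((pvGmul pvG2)^[pvCnt 2 array] pvOne))) 3 := by
    simp only [solution_alt, pvCount_eq]
    rw [pvGpow_eq pvG2 _ (by positivity), pvGpow_apply pvG1 _ _ (by positivity),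
      pvGpow_apply pvG0 _ _ (by positivity)]
    simp
  rw [hA, hB, pvG_eq]
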